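-- pv_equiv track=rewrite | github.com/Jorgitou98/Sistemas-de-Gestion-de-Datos-y-de-la-Informacion | Práctica 4 - Recuperación de la información/Practica 4 SGDI/Ejercicio1/VectorialIndex.py | intersect_multiple
-- ===== SOURCE A (Python) =====
-- def intersect(l1, l2):
-- 	sol = []
-- 	while l1 != [] and l2 != []:
--
-- 		if l1[0] == l2[0]:
--
-- 			sol.append(l1[0])
-- 			l1 = l1[1:]
-- 			l2 = l2[1:]
--
-- 		elif l1[0] < l2[0]:
--
-- 			l1 = l1[1:]
--
-- 		else:
-- 			l2 = l2[1:]
--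
-- 	return sol
--
-- def intersect_multiple(l_lists):
--
-- 	if l_lists == []:
-- 		return []
--
-- 	l_lists = sorted(l_lists, key = len)
--
-- 	# Sabemos que l_lists != [] y podemos acceder a su posición 0
-- 	sol = l_lists[0]
-- 	terms = l_lists[1:]
--
-- 	while terms != [] and sol != []:
-- 		sol = intersect(sol, terms[0])
-- 		terms = terms[1:]
--
-- 	return sol
-- ===== SOURCE B (Python) =====
-- def intersect_multiple(l_lists):
--     if not l_lists:
--         return []
--     ordered = sorted(l_lists, key=len)
--     sol = ordered[0]
--     for term in ordered[1:]:
--         if not sol: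
--             break
--         i = j = 0
--         out = []
--         while i < len(sol) and j < len(term):
--             a, b = sol[i], term[j]
--             if a == b:
--                 out.append(a)
--                 i += 1
--                 j += 1
--             elif a < b:
--                 i += 1
--             else:
--                 j += 1
--         sol = out
--     return sol
-- ===== Notes on version B (the rewrite author's own statement) =====
-- stated objective: faster
-- what changed: Each pairwise merge advances two integer indices over the lists in place instead of repeatedly re-slicing both lists (each l[1:] copies the whole tail), removing the quadratic copying per merge.
import Mathlib
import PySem

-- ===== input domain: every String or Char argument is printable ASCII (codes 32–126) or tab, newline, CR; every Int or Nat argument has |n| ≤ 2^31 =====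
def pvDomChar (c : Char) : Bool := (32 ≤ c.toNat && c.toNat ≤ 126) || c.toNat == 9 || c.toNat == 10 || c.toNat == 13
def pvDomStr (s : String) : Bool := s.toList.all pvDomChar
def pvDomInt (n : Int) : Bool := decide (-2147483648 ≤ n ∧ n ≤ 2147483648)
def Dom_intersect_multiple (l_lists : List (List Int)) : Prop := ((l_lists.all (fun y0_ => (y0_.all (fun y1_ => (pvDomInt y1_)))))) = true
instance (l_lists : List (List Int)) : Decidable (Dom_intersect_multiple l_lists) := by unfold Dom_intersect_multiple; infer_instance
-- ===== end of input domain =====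

-- B replaces A's slice-based pairwise merge (l[1:] copies the tail each step) by a
-- two-pointer merge over integer indices; same return value, asymptotically less copying.

-- ===== PORT A =====
-- A's `intersect`: while both nonempty, compare heads and re-slice with l[1:].
def pvIntersectA (l1 l2 sol : List Int) : List Int :=
  match l1, l2 with
  | a :: t1, b :: t2 =>
      if a = b then pvIntersectA t1 t2 (sol ++ [a])
      else if a < b then pvIntersectA t1 (b :: t2) sol
      else pvIntersectA (a :: t1) t2 sol
  | _, _ => sol
termination_by l1.length + l2.length
decreasing_by all_goals (simp only [List.length_cons]; omega)

-- A's outer while loop: while terms != [] and sol != []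
def pvLoopA (sol : List Int) (terms : List (List Int)) : List Int :=
  match terms, sol with
  | [], _ => sol
  | _ :: _, [] => sol
  | t :: ts, _ :: _ => pvLoopA (pvIntersectA sol t []) ts

def intersect_multiple (l_lists : List (List Int)) : List Int :=
  if l_lists = [] then []
  else
    let sorted := PySem.List.sorted l_lists (fun l => (l.length : Int)) false
    match sorted with
    | [] => []
    | sol :: terms => pvLoopA sol terms

-- ===== PORT B =====
-- two-pointer inner loop: while i < len(sol) and j < len(term)
def pvTwoPtr (sol term : List Int) (i j : Nat) (out : List Int) : List Int :=
  if h : i < sol.length ∧ j < term.length then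
    let a := sol[i]'h.1
    let b := term[j]'h.2
    if a = b then pvTwoPtr sol term (i + 1) (j + 1) (out ++ [a])
    else if a < b then pvTwoPtr sol term (i + 1) j out
    else pvTwoPtr sol term i (j + 1) out
  else out
termination_by (sol.length - i) + (term.length - j)
decreasing_by all_goals omega

-- for term in ordered[1:], with `if not sol: break`
def pvLoopB (sol : List Int) (terms : List (List Int)) : List Int :=
  match terms with
  | [] => sol
  | t :: ts => if sol = [] then sol else pvLoopB (pvTwoPtr sol t 0 0 []) ts

def intersect_multiple_alt (l_lists : List (List Int)) : List Int :=
  if l_lists = [] then []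
  else
    let ordered := PySem.List.sorted l_lists (fun l => (l.length : Int)) false
    match ordered with
    | [] => []
    | sol :: rest => pvLoopB sol rest

-- ===== PRECONDITION & SPEC =====
def Spec_intersect_multiple (l_lists : List (List Int)) (out : List Int) : Prop := out = intersect_multiple_alt l_lists
instance (l_lists : List (List Int)) (out : List Int) : Decidable (Spec_intersect_multiple l_lists out) := by unfold Spec_intersect_multiple; infer_instance

-- ===== CLAIM (what is proved, stated in full; the proofs are below) =====
def Claim_equal_intersect_multiple : Prop := ∀ (l_lists : List (List Int)), Dom_intersect_multiple l_lists → Spec_intersect_multiple l_lists (intersect_multiple l_lists)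

-- ===== LEMMAS AND PROOFS =====

-- the two-pointer merge equals the slicing merge on the remaining suffixes
theorem pvTwoPtr_eq_intersectA (sol term : List Int) (i j : Nat) (out : List Int) :
    pvTwoPtr sol term i j out = pvIntersectA (sol.drop i) (term.drop j) out := by
  by_cases h : i < sol.length ∧ j < term.length
  · obtain ⟨h1, h2⟩ := h
    rw [pvTwoPtr]
    simp only [h1, h2, and_self, dite_true]
    rw [List.drop_eq_getElem_cons h1, List.drop_eq_getElem_cons h2]
    rw [pvIntersectA]
    split_ifs with he hl
    · rw [pvTwoPtr_eq_intersectA]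
    · rw [pvTwoPtr_eq_intersectA, ← List.drop_eq_getElem_cons h2]
    · rw [pvTwoPtr_eq_intersectA, ← List.drop_eq_getElem_cons h1]
  · rw [pvTwoPtr]
    simp only [h, dite_false]
    rcases Nat.lt_or_ge i sol.length with h1 | h1
    · have h2 : term.length ≤ j := by omega
      rw [List.drop_eq_nil_of_le h2]
      rw [pvIntersectA]
      simp
    · rw [List.drop_eq_nil_of_le h1]
      rw [pvIntersectA]
      simp
  termination_by (sol.length - i) + (term.length - j)
  decreasing_by all_goals omega

theorem pvLoopB_eq_pvLoopA (terms : List (List Int)) (sol : List Int) :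
    pvLoopB sol terms = pvLoopA sol terms := by
  induction terms generalizing sol with
  | nil => rfl
  | cons t ts ih =>
      cases sol with
      | nil => simp [pvLoopB, pvLoopA]
      | cons a s =>
          rw [pvLoopB, pvLoopA]
          simp only [List.cons_ne_nil, if_false]
          rw [pvTwoPtr_eq_intersectA]
          simp [ih]

-- ===== VERDICT (by name: the statement is the Claim_ definition above) =====
theorem intersect_multiple_spec : Claim_equal_intersect_multiple := by
  intro l_lists _
  unfold Spec_intersect_multiple intersect_multiple intersect_multiple_alt
  split_ifs with h
  · rfl
  · cases PySem.List.sorted l_lists (fun l => (l.length : Int)) false with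
    | nil => rfl
    | cons sol terms => simp only [pvLoopB_eq_pvLoopA]
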